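-- pv_equiv track=rewrite | github.com/TryChhensorng/backseat-group | exercise-1.py | replace_last
-- ===== SOURCE A (Python) =====
-- def replace_last(numbers):
--     temp = numbers[:]
--     last = len(numbers)-1
--     temp[0]=numbers[last]
--     for i in range(len(numbers)-1):
--         temp[i+1] = numbers[i]
--     return temp
--     ...
-- ===== SOURCE B (Python) =====
-- def replace_last(numbers):
--     return [numbers[-1]] + numbers[:-1]
-- ===== Notes on version B (the rewrite author's own statement) =====
-- stated objective: simpler
-- what changed: Replaces the copy-then-index-by-index shifting loop with a single closed-form construction: the last element prepended to the slice of all but the last.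
-- outside the precondition, e.g. on replace_last([]): A raises IndexError, B raises IndexError
import Mathlib
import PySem

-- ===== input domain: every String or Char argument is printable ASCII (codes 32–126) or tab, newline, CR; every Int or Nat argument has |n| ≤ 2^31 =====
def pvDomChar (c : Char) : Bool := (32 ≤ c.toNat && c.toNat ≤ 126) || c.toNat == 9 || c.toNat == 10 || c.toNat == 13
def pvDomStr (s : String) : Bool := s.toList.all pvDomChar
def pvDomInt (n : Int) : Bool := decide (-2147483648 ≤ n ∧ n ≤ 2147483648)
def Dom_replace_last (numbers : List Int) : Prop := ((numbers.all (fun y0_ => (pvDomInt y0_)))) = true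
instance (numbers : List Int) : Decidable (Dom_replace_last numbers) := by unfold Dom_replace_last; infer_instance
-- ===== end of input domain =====

-- B builds the rotation in one closed-form slice expression instead of A's copy-then-shift index loop (objective: simpler).

-- ===== PORT A =====
def replace_last (numbers : List Int) : List Int :=
  let temp := PySem.List.slice numbers none none
  let last : Int := (numbers.length : Int) - 1
  let temp := PySem.List.pySetD temp 0 (PySem.List.pyGetD numbers last 0)
  (PySem.List.pyRange 0 ((numbers.length : Int) - 1) 1).foldl
    (fun t i => PySem.List.pySetD t (i + 1) (PySem.List.pyGetD numbers i 0)) temp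

-- ===== PORT B =====
def replace_last_alt (numbers : List Int) : List Int :=
  PySem.List.pyGetD numbers (-1) 0 :: PySem.List.slice numbers none (some (-1))

-- ===== PRECONDITION & SPEC =====
-- Pre_ excludes the empty list, on which both A and B raise IndexError (the last-element read).
def Pre_replace_last (numbers : List Int) : Prop := numbers ≠ []
instance (numbers : List Int) : Decidable (Pre_replace_last numbers) := by unfold Pre_replace_last; infer_instance
def pvWitness_replace_last : List Int := [1, 2, 3]

def Spec_replace_last (numbers : List Int) (out : List Int) : Prop := out = replace_last_alt numbers
instance (numbers : List Int) (out : List Int) : Decidable (Spec_replace_last numbers out) := by unfold Spec_replace_last; infer_instance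

-- ===== CLAIM (what is proved, stated in full; the proofs are below) =====
def Claim_equal_replace_last : Prop := ∀ (numbers : List Int), Dom_replace_last numbers → Pre_replace_last numbers → Spec_replace_last numbers (replace_last numbers)

-- ===== LEMMAS AND PROOFS =====

-- After m loop iterations the first m tail slots hold numbers[0..m-1]; the rest is still the copy's tail.
lemma loop_inv (x : Int) (xs : List Int) (h : Int) :
    ∀ m : Nat, m ≤ xs.length →
      (PySem.List.pyRange 0 (m : Int) 1).foldl
        (fun t i => PySem.List.pySetD t (i + 1) (PySem.List.pyGetD (x :: xs) i 0)) (h :: xs)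
      = h :: ((x :: xs).take m ++ xs.drop m) := by
  intro m
  induction m with
  | zero => simp [PySem.List.pyRange_one_eq_nil]
  | succ m ih =>
    intro hm
    have hm' : m ≤ xs.length := Nat.le_of_succ_le hm
    have hmxs : m < xs.length := hm
    have hsplit : PySem.List.pyRange 0 ((m : Int) + 1) 1
        = PySem.List.pyRange 0 (m : Int) 1 ++ [(m : Int)] :=
      PySem.List.pyRange_one_succ_right (by positivity)
    have hcast : ((m + 1 : Nat) : Int) = (m : Int) + 1 := by push_cast; ring
    rw [hcast, hsplit, List.foldl_append, ih hm']
    simp only [List.foldl_cons, List.foldl_nil]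
    have hmlt : m < (x :: xs).length := by simp; omega
    have hget : PySem.List.pyGetD (x :: xs) (m : Int) 0 = (x :: xs)[m] := by
      rw [PySem.List.pyGetD_natCast]
      simp [List.getElem?_eq_getElem hmlt]
    have hset : PySem.List.pySetD (h :: ((x :: xs).take m ++ xs.drop m)) ((m : Int) + 1) ((x :: xs)[m])
        = h :: (((x :: xs).take m ++ xs.drop m).set m ((x :: xs)[m])) := by
      rw [← hcast, PySem.List.pySetD_natCast]
      rfl
    rw [hget, hset]
    congr 1
    have hlen : ((x :: xs).take m).length = m := by simp; omega
    have hdrop : xs.drop m = xs[m] :: xs.drop (m + 1) := List.drop_eq_getElem_cons hmxs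
    have htake : (x :: xs).take (m + 1) = (x :: xs).take m ++ [(x :: xs)[m]] :=
      List.take_succ_eq_append_getElem hmlt
    rw [hdrop, List.set_append, hlen, htake]
    simp only [Nat.sub_self, List.set_cons_zero, List.append_assoc, List.cons_append,
      List.nil_append, lt_irrefl, if_false]
theorem replace_last_spec : Claim_equal_replace_last := by
  intro numbers _ hpre
  unfold Spec_replace_last replace_last replace_last_alt
  obtain ⟨x, xs, rfl⟩ : ∃ y ys, numbers = y :: ys := by
    cases numbers with
    | nil => exact absurd rfl hpre
    | cons a as => exact ⟨a, as, rfl⟩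
  have hlen1 : ((x :: xs).length : Int) - 1 = ((xs.length : Nat) : Int) := by
    push_cast [List.length_cons]; ring
  simp only [PySem.List.slice_none_none, hlen1]
  set v := PySem.List.pyGetD (x :: xs) ((xs.length : Nat) : Int) 0 with hv
  have hset0 : PySem.List.pySetD (x :: xs) 0 v = v :: xs := by
    rw [show (0 : Int) = ((0 : Nat) : Int) from rfl, PySem.List.pySetD_natCast]
    rfl
  rw [hset0, loop_inv x xs v xs.length le_rfl]
  have hhead : v = PySem.List.pyGetD (x :: xs) (-1) 0 := by
    rw [hv]
    simp [PySem.List.pyGetD, PySem.List.pyGet?_neg_one, List.getLast?_eq_getElem?]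
  have htail : (x :: xs).take xs.length ++ xs.drop xs.length
      = PySem.List.slice (x :: xs) none (some (-1)) := by
    rw [PySem.List.slice_to_neg_one, List.dropLast_eq_take]
    simp
  rw [hhead, htail]
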